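-- pv_equiv track=rewrite | github.com/ShandyDrm/contrastive-wsd | model.py | find_relevant_subwords_indices
-- ===== SOURCE A (Python) =====
-- def find_relevant_subwords_indices(word_ids, loc):
--     relevant_subwords_idx = []
--     word_ids_idx = 1   # skip [CLS]
--     while word_ids[word_ids_idx] < loc:
--         word_ids_idx += 1
--
--     while word_ids[word_ids_idx] == loc:
--         relevant_subwords_idx.append(word_ids_idx)
--         word_ids_idx += 1
--
--     return relevant_subwords_idx
-- ===== SOURCE B (Python) =====
-- def find_relevant_subwords_indices(word_ids, loc):
--     # Stage 1: loc-independent run-length decomposition of word_ids[1:] into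
--     # maximal runs (value, start, end) of consecutive equal word ids.
--     runs = []
--     i, n = 1, len(word_ids)
--     while i < n:
--         j = i + 1
--         while j < n and word_ids[j] == word_ids[i]:
--             j += 1
--         runs.append((word_ids[i], i, j))
--         i = j
--     # Stage 2: the first run at or above loc decides the whole answer.
--     for v, start, end in runs:
--         if v >= loc:
--             return list(range(start, end)) if v == loc else []
--     return []
-- ===== Notes on version B (the rewrite author's own statement) =====
-- stated objective: alternative
-- what changed: B replaces A's loc-driven pair of index while-loops by a two-stage algorithm: it first builds a loc-independent run-length decomposition of word_ids[1:] into maximal (value, start, end) runs, then selects the first run whose value is >= loc and emits its index range; B is total where A can raise IndexError.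
-- crash fix: On inputs whose tail suffix from the first element >= loc consists only of loc (in particular when every element of word_ids[1:] is < loc, or the run of loc reaches the end of the list), A raises IndexError running off the list end; B returns the run's index range (e.g. [2] on ([0,1,2],2)). — e.g. on find_relevant_subwords_indices([0, 1, 2], 2): A raises IndexError, B returns [2]
import Mathlib
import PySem

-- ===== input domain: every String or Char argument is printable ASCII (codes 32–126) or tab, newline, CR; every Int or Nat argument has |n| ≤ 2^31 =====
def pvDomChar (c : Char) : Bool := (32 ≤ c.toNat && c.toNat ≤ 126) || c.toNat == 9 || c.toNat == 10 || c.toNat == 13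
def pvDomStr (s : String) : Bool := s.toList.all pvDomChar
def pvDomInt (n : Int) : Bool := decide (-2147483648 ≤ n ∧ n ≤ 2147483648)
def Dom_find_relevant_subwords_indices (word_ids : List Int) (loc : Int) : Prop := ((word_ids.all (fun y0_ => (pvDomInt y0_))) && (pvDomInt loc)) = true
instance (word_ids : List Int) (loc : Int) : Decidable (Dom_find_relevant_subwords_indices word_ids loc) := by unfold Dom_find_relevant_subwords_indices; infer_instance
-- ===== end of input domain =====

-- B first builds a loc-independent run-length decomposition of word_ids[1:] and then selects the
-- run by value, instead of A's loc-driven index scanning; Pre_ excludes exactly A's IndexErrors.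

-- ===== PORT A =====
-- first while loop: advance idx while word_ids[idx] < loc (pyGet? none = IndexError, outside
-- Pre_; fuel word_ids.length bounds the iterations — the loop reads an index each step, so it
-- either stops or raises within that many steps)
def pvALoop1 (word_ids : List Int) (loc : Int) (idx fuel : Nat) : Nat :=
  match fuel with
  | 0 => idx
  | fuel + 1 =>
    match PySem.List.pyGet? word_ids (idx : Int) with
    | none => idx
    | some v => if v < loc then pvALoop1 word_ids loc (idx + 1) fuel else idx

-- second while loop: append idx while word_ids[idx] == loc (pyGet? none = IndexError, outside Pre_)
def pvALoop2 (word_ids : List Int) (loc : Int) (idx fuel : Nat) (acc : List Int) : List Int :=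
  match fuel with
  | 0 => acc
  | fuel + 1 =>
    match PySem.List.pyGet? word_ids (idx : Int) with
    | none => acc
    | some v => if v = loc then pvALoop2 word_ids loc (idx + 1) fuel (acc ++ [(idx : Int)]) else acc

def find_relevant_subwords_indices (word_ids : List Int) (loc : Int) : List Int :=
  pvALoop2 word_ids loc (pvALoop1 word_ids loc 1 word_ids.length) word_ids.length []

-- ===== PORT B =====
-- inner while loop of stage 1: advance j while j < n and word_ids[j] == word_ids[i]; both
-- bound checks precede the read, so getD is exact for Python's word_ids[j]; the fuel only
-- guards totality (the loop adds 1 to j each step, so fuel = length suffices)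
def pvRunEnd (word_ids : List Int) (v : Int) (j fuel : Nat) : Nat :=
  match fuel with
  | 0 => j
  | fuel + 1 =>
    if j < word_ids.length ∧ word_ids.getD j 0 = v then pvRunEnd word_ids v (j + 1) fuel
    else j

-- outer while loop of stage 1: collect the maximal runs (value, start, end) from index i on
-- (fuel guards totality: each iteration moves i to j ≥ i + 1, so fuel = length suffices)
def pvRuns (word_ids : List Int) (i fuel : Nat) : List (Int × Nat × Nat) :=
  match fuel with
  | 0 => []
  | fuel + 1 =>
    if i < word_ids.length then
      let j := pvRunEnd word_ids (word_ids.getD i 0) (i + 1) word_ids.length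
      (word_ids.getD i 0, i, j) :: pvRuns word_ids j fuel
    else []

-- stage 2: the first run whose value is ≥ loc decides the answer
def pvPickRun (runs : List (Int × Nat × Nat)) (loc : Int) : List Int :=
  match runs with
  | [] => []
  | (v, start, stop) :: rest =>
    if loc ≤ v then (if v = loc then PySem.List.pyRange (start : Int) (stop : Int) 1 else [])
    else pvPickRun rest loc

def find_relevant_subwords_indices_alt (word_ids : List Int) (loc : Int) : List Int :=
  pvPickRun (pvRuns word_ids 1 word_ids.length) loc

-- ===== PRECONDITION & SPEC =====
-- Pre_ excludes exactly the inputs on which A raises IndexError: those where, after dropping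
-- the tail ids below loc and then the run equal to loc, nothing of word_ids[1:] remains
-- (so one of A's two loops runs off the end of the list).
def Pre_find_relevant_subwords_indices (word_ids : List Int) (loc : Int) : Prop :=
  ((word_ids.drop 1).dropWhile (fun x => decide (x < loc))).dropWhile (fun x => x == loc) ≠ []
instance (word_ids : List Int) (loc : Int) : Decidable (Pre_find_relevant_subwords_indices word_ids loc) := by unfold Pre_find_relevant_subwords_indices; infer_instance

def pvWitness_find_relevant_subwords_indices : List Int × Int := ([0, 2, 3, 3, 5], 3)

-- On inputs whose tail suffix from the first element ≥ loc consists only of loc, A raises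
-- IndexError running off the list end; B returns the run's index range.
-- (The condition below is exactly where Python A raises: its first scan stops at the first tail
-- element ≥ loc — dropWhile (< loc) — and A raises iff everything from there on equals loc.)
def Raises_find_relevant_subwords_indices (word_ids : List Int) (loc : Int) : Prop :=
  (((word_ids.drop 1).dropWhile (fun x => decide (x < loc))).all (fun x => x == loc)) = true
instance (word_ids : List Int) (loc : Int) : Decidable (Raises_find_relevant_subwords_indices word_ids loc) := by unfold Raises_find_relevant_subwords_indices; infer_instance

def pvRaiseWitness_find_relevant_subwords_indices : List Int × Int := ([0, 1, 2], 2)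
def pvRaiseWitnessOut_find_relevant_subwords_indices : List Int := [2]

def Spec_find_relevant_subwords_indices (word_ids : List Int) (loc : Int) (out : List Int) : Prop := out = find_relevant_subwords_indices_alt word_ids loc
instance (word_ids : List Int) (loc : Int) (out : List Int) : Decidable (Spec_find_relevant_subwords_indices word_ids loc out) := by unfold Spec_find_relevant_subwords_indices; infer_instance

-- ===== CLAIM (what is proved, stated in full; the proofs are below) =====
def Claim_equal_find_relevant_subwords_indices : Prop := ∀ (word_ids : List Int) (loc : Int), Dom_find_relevant_subwords_indices word_ids loc → Pre_find_relevant_subwords_indices word_ids loc → Spec_find_relevant_subwords_indices word_ids loc (find_relevant_subwords_indices word_ids loc)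

def Claim_raises_find_relevant_subwords_indices : Prop := (∀ (word_ids : List Int) (loc : Int), Dom_find_relevant_subwords_indices word_ids loc → Raises_find_relevant_subwords_indices word_ids loc → ¬ Pre_find_relevant_subwords_indices word_ids loc) ∧ (Dom_find_relevant_subwords_indices (pvRaiseWitness_find_relevant_subwords_indices.1) (pvRaiseWitness_find_relevant_subwords_indices.2) ∧ Raises_find_relevant_subwords_indices (pvRaiseWitness_find_relevant_subwords_indices.1) (pvRaiseWitness_find_relevant_subwords_indices.2) ∧ find_relevant_subwords_indices_alt (pvRaiseWitness_find_relevant_subwords_indices.1) (pvRaiseWitness_find_relevant_subwords_indices.2) = pvRaiseWitnessOut_find_relevant_subwords_indices)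

-- ===== LEMMAS AND PROOFS =====

-- a takeWhile prefix is never longer than the list
lemma pvTakeWhile_len_le (p : Int → Bool) (xs : List Int) : (xs.takeWhile p).length ≤ xs.length := by
  induction xs with
  | nil => simp
  | cons x t ih =>
    rw [List.takeWhile_cons]
    split
    · simp; omega
    · simp

-- A's first loop stops exactly after the < loc prefix of the suffix it scans
lemma pvALoop1_eq (word_ids : List Int) (loc : Int) :
    ∀ (fuel idx : Nat), word_ids.length ≤ idx + fuel →
    pvALoop1 word_ids loc idx fuel =
      idx + ((word_ids.drop idx).takeWhile (fun x => decide (x < loc))).length := by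
  intro fuel
  induction fuel with
  | zero =>
    intro idx h
    rw [List.drop_eq_nil_of_le (by omega)]
    simp [pvALoop1]
  | succ fuel ih =>
    intro idx h
    rw [pvALoop1]
    cases hg : PySem.List.pyGet? word_ids (idx : Int) with
    | none =>
      rw [PySem.List.pyGet?_natCast] at hg
      have hge : word_ids.length ≤ idx := by
        by_contra hlt
        simp [List.getElem?_eq_getElem (by omega : idx < word_ids.length)] at hg
      rw [List.drop_eq_nil_of_le hge]
      simp
    | some v =>
      rw [PySem.List.pyGet?_natCast] at hg
      obtain ⟨hlt, hv⟩ := List.getElem?_eq_some_iff.mp hg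
      rw [List.drop_eq_getElem_cons hlt, hv, List.takeWhile_cons]
      by_cases hvl : v < loc
      · simp only [hvl, decide_true]
        rw [ih (idx + 1) (by omega)]
        simp; omega
      · simp [hvl]

-- A's second loop appends exactly the indices of the == loc run
lemma pvALoop2_eq (word_ids : List Int) (loc : Int) :
    ∀ (fuel idx : Nat) (acc : List Int), word_ids.length ≤ idx + fuel →
    pvALoop2 word_ids loc idx fuel acc =
      acc ++ PySem.List.pyRange (idx : Int)
        ((idx : Int) + ((word_ids.drop idx).takeWhile (fun x => x == loc)).length) 1 := by
  intro fuel
  induction fuel with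
  | zero =>
    intro idx acc h
    rw [List.drop_eq_nil_of_le (by omega)]
    simp [pvALoop2, PySem.List.pyRange_one_eq_nil]
  | succ fuel ih =>
    intro idx acc h
    rw [pvALoop2]
    cases hg : PySem.List.pyGet? word_ids (idx : Int) with
    | none =>
      rw [PySem.List.pyGet?_natCast] at hg
      have hge : word_ids.length ≤ idx := by
        by_contra hlt
        simp [List.getElem?_eq_getElem (by omega : idx < word_ids.length)] at hg
      rw [List.drop_eq_nil_of_le hge]
      simp [PySem.List.pyRange_one_eq_nil]
    | some v =>
      rw [PySem.List.pyGet?_natCast] at hg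
      obtain ⟨hlt, hv⟩ := List.getElem?_eq_some_iff.mp hg
      rw [List.drop_eq_getElem_cons hlt, hv, List.takeWhile_cons]
      by_cases hvl : v = loc
      · simp only [hvl, beq_self_eq_true, if_true]
        rw [ih (idx + 1) _ (by omega), List.length_cons]
        set L := ((word_ids.drop (idx + 1)).takeWhile (fun x => x == loc)).length with hL
        have hcons : PySem.List.pyRange (idx : Int) ((idx : Int) + ((L + 1 : Nat) : Int)) 1
            = (idx : Int) :: PySem.List.pyRange ((idx : Int) + 1) ((idx : Int) + ((L + 1 : Nat) : Int)) 1 :=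
          PySem.List.pyRange_one_cons (by push_cast; omega)
        have e2 : ((idx + 1 : Nat) : Int) + (L : Int) = (idx : Int) + ((L + 1 : Nat) : Int) := by
          push_cast; ring
        have e1 : ((idx + 1 : Nat) : Int) = (idx : Int) + 1 := by push_cast; ring
        rw [e2, e1, hcons, List.append_assoc, List.singleton_append]
      · simp [hvl, PySem.List.pyRange_one_eq_nil le_rfl]

-- A's port always computes the boundary form pyRange (idx0 + s) (idx0 + s + r) with idx0 = 1
lemma pvA_char (word_ids : List Int) (loc : Int) :
    find_relevant_subwords_indices word_ids loc =
      PySem.List.pyRange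
        ((1 + ((word_ids.drop 1).takeWhile (fun x => decide (x < loc))).length : Nat) : Int)
        (((1 + ((word_ids.drop 1).takeWhile (fun x => decide (x < loc))).length : Nat) : Int) +
          ((((word_ids.drop 1).drop ((word_ids.drop 1).takeWhile (fun x => decide (x < loc))).length).takeWhile (fun x => x == loc)).length : Int)) 1 := by
  unfold find_relevant_subwords_indices
  set tail := word_ids.drop 1 with htail
  set s := (tail.takeWhile (fun x => decide (x < loc))).length with hsdef
  have h1 : pvALoop1 word_ids loc 1 word_ids.length = 1 + s := by
    rw [pvALoop1_eq word_ids loc word_ids.length 1 (by omega)]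
  rw [h1, pvALoop2_eq word_ids loc word_ids.length (1 + s) [] (by omega)]
  have hdd : word_ids.drop (1 + s) = tail.drop s := by
    rw [htail, List.drop_drop, Nat.add_comm]
  rw [hdd, List.nil_append]

-- dropWhile is drop of the takeWhile prefix length
lemma pvDropWhile_eq_drop (p : Int → Bool) (l : List Int) :
    l.dropWhile p = l.drop (l.takeWhile p).length := by
  induction l with
  | nil => simp
  | cons x xs ih =>
    rw [List.dropWhile_cons, List.takeWhile_cons]
    by_cases hp : p x = true
    · simp [hp, ih]
    · simp [hp]

-- a list whose elements all satisfy p passes whole through takeWhile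
lemma pvTakeWhile_append_all (p : Int → Bool) (a b : List Int) (h : ∀ x ∈ a, p x = true) :
    (a ++ b).takeWhile p = a ++ b.takeWhile p := by
  induction a with
  | nil => simp
  | cons x t ih =>
    rw [List.cons_append, List.takeWhile_cons, if_pos (h x (by simp))]
    rw [ih (fun y hy => h y (by simp [hy]))]
    rfl

-- nothing satisfying p is left at the head after dropWhile p
lemma pvTakeWhile_dropWhile_nil (p : Int → Bool) (l : List Int) :
    (l.dropWhile p).takeWhile p = [] := by
  induction l with
  | nil => simp
  | cons x t ih =>
    rw [List.dropWhile_cons]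
    by_cases hp : p x = true
    · simpa [hp] using ih
    · simp [hp, List.takeWhile_cons]

-- reading a list at an in-range index splits off that element
lemma pvDrop_cons (l : List Int) (i : Nat) (h : i < l.length) :
    l.drop i = l.getD i 0 :: l.drop (i + 1) := by
  rw [List.getD_eq_getElem?_getD, List.getElem?_eq_getElem h, Option.getD_some]
  exact List.drop_eq_getElem_cons h

-- B's inner while loop stops exactly after the run of values equal to v
lemma pvRunEnd_eq (word_ids : List Int) (v : Int) :
    ∀ (fuel j : Nat), word_ids.length ≤ j + fuel →
    pvRunEnd word_ids v j fuel =
      j + ((word_ids.drop j).takeWhile (fun x => x == v)).length := by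
  intro fuel
  induction fuel with
  | zero =>
    intro j h
    rw [List.drop_eq_nil_of_le (by omega)]
    simp [pvRunEnd]
  | succ fuel ih =>
    intro j h
    rw [pvRunEnd]
    by_cases hj : j < word_ids.length
    · rw [pvDrop_cons word_ids j hj, List.takeWhile_cons]
      by_cases hv : word_ids.getD j 0 = v
      · rw [if_pos ⟨hj, hv⟩, ih (j + 1) (by omega)]
        simp only [hv, beq_self_eq_true, if_true, List.length_cons]
        omega
      · have hne : (word_ids.getD j 0 == v) = false := by simpa using hv
        rw [if_neg (fun hc => hv hc.2), hne]
        simp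
    · rw [if_neg (by tauto), List.drop_eq_nil_of_le (by omega)]
      simp

-- the run selection over the runs from index i equals A's boundary form from index i
lemma pvRuns_pick (word_ids : List Int) (loc : Int) :
    ∀ (fuel i : Nat), word_ids.length ≤ i + fuel →
    pvPickRun (pvRuns word_ids i fuel) loc =
      PySem.List.pyRange ((i + ((word_ids.drop i).takeWhile (fun x => decide (x < loc))).length : Nat) : Int)
        (((i + ((word_ids.drop i).takeWhile (fun x => decide (x < loc))).length : Nat) : Int) +
          ((((word_ids.drop i).drop ((word_ids.drop i).takeWhile (fun x => decide (x < loc))).length).takeWhile (fun x => x == loc)).length : Int)) 1 := by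
  intro fuel
  induction fuel with
  | zero =>
    intro i h
    rw [List.drop_eq_nil_of_le (by omega)]
    simp [pvRuns, pvPickRun, PySem.List.pyRange_one_eq_nil]
  | succ fuel ih =>
    intro i h
    rw [pvRuns]
    by_cases hi : i < word_ids.length
    · rw [if_pos hi]
      set v := word_ids.getD i 0 with hvdef
      set cnt := ((word_ids.drop (i + 1)).takeWhile (fun x => x == v)).length with hcnt
      have hj : pvRunEnd word_ids v (i + 1) word_ids.length = (i + 1) + cnt :=
        pvRunEnd_eq word_ids v word_ids.length (i + 1) (by omega)
      have hcntle : cnt ≤ word_ids.length - (i + 1) := by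
        have := pvTakeWhile_len_le (fun x => x == v) (word_ids.drop (i + 1))
        rw [List.length_drop] at this
        omega
      -- decompose the suffix: word_ids.drop i = v :: a ++ b with a the == v run, b the rest
      have hsplit : word_ids.drop (i + 1) =
          (word_ids.drop (i + 1)).takeWhile (fun x => x == v) ++
          (word_ids.drop (i + 1)).dropWhile (fun x => x == v) :=
        (List.takeWhile_append_dropWhile).symm
      set a := (word_ids.drop (i + 1)).takeWhile (fun x => x == v) with hadef
      set b := (word_ids.drop (i + 1)).dropWhile (fun x => x == v) with hbdef
      have ha : ∀ x ∈ a, x = v := by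
        intro x hx
        have := List.mem_takeWhile_imp hx
        simpa using this
      have hbdrop : b = word_ids.drop ((i + 1) + cnt) := by
        rw [hbdef, pvDropWhile_eq_drop, ← hcnt, List.drop_drop]
        try (congr 1; omega)
      have hdropi : word_ids.drop i = v :: (a ++ b) := by
        rw [pvDrop_cons word_ids i hi, hsplit]
      rw [hj, pvPickRun]
      by_cases hlt : v < loc
      · -- the run is below loc: skipped, and it joins the < loc prefix of the suffix
        rw [if_neg (by omega)]
        rw [ih ((i + 1) + cnt) (by omega)]
        have hsplit2 : (word_ids.drop i).takeWhile (fun x => decide (x < loc)) =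
            v :: (a ++ b.takeWhile (fun x => decide (x < loc))) := by
          rw [hdropi, List.takeWhile_cons, if_pos (by simpa using hlt),
            pvTakeWhile_append_all _ a b (by intro x hx; rw [ha x hx]; simpa using hlt)]
        have hlen : ((word_ids.drop i).takeWhile (fun x => decide (x < loc))).length
            = (1 + cnt) + (b.takeWhile (fun x => decide (x < loc))).length := by
          rw [hsplit2]
          simp [hadef]
          omega
        have hdrop2 : (word_ids.drop i).drop ((word_ids.drop i).takeWhile (fun x => decide (x < loc))).length
            = b.drop (b.takeWhile (fun x => decide (x < loc))).length := by
          rw [hlen, hbdrop, List.drop_drop, List.drop_drop]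
          try (congr 1; omega)
        rw [hdrop2, hlen, ← hbdrop]
        congr 1
        all_goals push_cast; ring
      · by_cases heq : v = loc
        · -- the run is the answer: indices i … (i+1)+cnt
          rw [if_pos (by omega), if_pos heq]
          have hs0 : (word_ids.drop i).takeWhile (fun x => decide (x < loc)) = [] := by
            rw [hdropi, List.takeWhile_cons, if_neg (by simpa using hlt)]
          have hr : (word_ids.drop i).takeWhile (fun x => x == loc) = v :: a := by
            rw [hdropi, List.takeWhile_cons, if_pos (by simp [heq])]
            rw [pvTakeWhile_append_all _ a b (by intro x hx; simp [ha x hx, heq])]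
            have : b.takeWhile (fun x => x == loc) = [] := by
              rw [hbdef, ← heq]
              exact pvTakeWhile_dropWhile_nil _ _
            rw [this, List.append_nil]
          rw [hs0]
          simp only [List.length_nil, List.drop_zero, Nat.add_zero, hr]
          have halen : a.length = cnt := by rw [hadef]
          congr 1
          all_goals push_cast [List.length_cons, halen]; ring
        · -- the run is above loc: the answer is empty and so is A's boundary window
          rw [if_pos (by omega), if_neg heq]
          have hs0 : (word_ids.drop i).takeWhile (fun x => decide (x < loc)) = [] := by
            rw [hdropi, List.takeWhile_cons, if_neg (by simpa using hlt)]
          have hr0 : (word_ids.drop i).takeWhile (fun x => x == loc) = [] := by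
            rw [hdropi, List.takeWhile_cons, if_neg (by simp [heq])]
          rw [hs0]
          simp only [List.length_nil, List.drop_zero, Nat.add_zero, hr0]
          rw [PySem.List.pyRange_one_eq_nil (by simp)]
    · rw [if_neg hi, List.drop_eq_nil_of_le (by omega)]
      simp [pvPickRun, PySem.List.pyRange_one_eq_nil]

-- the two ports agree on every input (B's run selection equals A's boundary form)
lemma main_eq (word_ids : List Int) (loc : Int) :
    find_relevant_subwords_indices word_ids loc = find_relevant_subwords_indices_alt word_ids loc := by
  rw [pvA_char]
  unfold find_relevant_subwords_indices_alt
  rw [pvRuns_pick word_ids loc word_ids.length 1 (by omega)]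

-- ===== VERDICT (by name: the statement is the Claim_ definition above) =====
theorem find_relevant_subwords_indices_spec : Claim_equal_find_relevant_subwords_indices := by
  intro w loc _ _
  unfold Spec_find_relevant_subwords_indices
  exact main_eq w loc

@[simp] theorem find_relevant_subwords_indices_raises : Claim_raises_find_relevant_subwords_indices := by
  unfold Claim_raises_find_relevant_subwords_indices
  constructor
  · intro w loc _ hr hpre
    apply hpre
    rw [List.dropWhile_eq_nil_iff]
    intro x hx
    exact List.all_eq_true.mp hr x hx
  · refine ⟨by decide, by decide, by decide⟩
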